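-- pv_equiv track=rewrite | github.com/incalescence/LeetCode | duplicateHospital/solution.py | solution
-- ===== SOURCE A (Python) =====
-- def solution(A):
--     # Create a hashmap of the doctors as keys and number of hospitals they work as values
--     count = {}
--     sum = 0
--     for i in range(len(A)):
--         for doctor in list(set(A[i])):
--             count[doctor] = count.get(doctor, 0) + 1
--     # return keys greater than 1
--     for value in count.values():
--         if value > 1:
--             sum += 1
--     return sum
-- ===== SOURCE B (Python) =====
-- def solution(A):
--     # Sort-then-scan: flatten the per-row deduped doctors into one pool, sort it,
--     # and count the maximal runs of equal values whose length exceeds 1.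
--     pool = sorted(d for row in A for d in set(row))
--     total = 0
--     i, n = 0, len(pool)
--     while i < n:
--         j = i + 1
--         while j < n and pool[j] == pool[i]:
--             j += 1
--         if j - i > 1:
--             total += 1
--         i = j
--     return total
-- ===== Notes on version B (the rewrite author's own statement) =====
-- stated objective: alternative
-- what changed: Replaced the hash-count dict plus a second pass over its values by a sort-then-scan: flatten the per-row deduplicated doctors into one pool, sort it, and count maximal runs of equal values longer than 1 with a two-pointer scan.
import Mathlib
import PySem

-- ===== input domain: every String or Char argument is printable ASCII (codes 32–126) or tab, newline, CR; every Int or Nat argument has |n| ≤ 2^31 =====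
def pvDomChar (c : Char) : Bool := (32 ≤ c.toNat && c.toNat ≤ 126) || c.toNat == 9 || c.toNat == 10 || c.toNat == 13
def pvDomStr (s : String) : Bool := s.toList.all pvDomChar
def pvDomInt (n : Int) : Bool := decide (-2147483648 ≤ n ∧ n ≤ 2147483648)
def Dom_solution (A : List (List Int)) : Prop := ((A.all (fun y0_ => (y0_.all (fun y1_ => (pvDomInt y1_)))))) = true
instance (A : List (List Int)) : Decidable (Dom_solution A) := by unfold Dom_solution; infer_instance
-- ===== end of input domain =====

-- B replaces A's count-dict plus a value pass by sort-then-scan: sort the flattened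
-- per-row-deduped pool and count maximal runs longer than 1; objective: alternative.

-- ===== PORT A =====
-- for i in range(len(A)): for doctor in list(set(A[i])): count[doctor] = count.get(doctor, 0) + 1; then count values > 1.
-- set(A[i]) is ported as PySem.Set.ofList; the returned sum depends only on the dict's multiset of values, not on set iteration order.
def solution (A : List (List Int)) : Int :=
  let count : PySem.Dict Int Int :=
    (PySem.List.pyRange 0 (PySem.List.len A) 1).foldl
      (fun d i =>
        (PySem.Set.ofList (PySem.List.pyGetD A i [])).foldl
          (fun d doctor => d.insert doctor (d.getD doctor 0 + 1)) d)
      PySem.Dict.empty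
  count.values.foldl (fun s v => if v > 1 then s + 1 else s) 0

-- ===== PORT B =====
-- inner while loop of Source B: starting after pool[i], advance j past the elements equal
-- to pool[i]; returns (number of extra equal elements, the remaining suffix pool[j:]).
def pvTakeRun (x : Int) : List Int → Nat × List Int
  | [] => (0, [])
  | y :: t => if y = x then ((pvTakeRun x t).1 + 1, (pvTakeRun x t).2) else (0, y :: t)

theorem pvTakeRun_length_le (x : Int) (l : List Int) : (pvTakeRun x l).2.length ≤ l.length := by
  induction l with
  | nil => simp [pvTakeRun]
  | cons y t ih =>
    by_cases h : y = x
    · simp only [pvTakeRun, h, if_true]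
      exact Nat.le_succ_of_le ih
    · simp [pvTakeRun, h]

-- outer while loop of Source B: at each remaining suffix, skip the current run,
-- adding 1 to the total when the run has length > 1.
def pvRunScan : List Int → Int
  | [] => 0
  | x :: rest =>
      (if 0 < (pvTakeRun x rest).1 then 1 else 0) + pvRunScan (pvTakeRun x rest).2
  termination_by l => l.length
  decreasing_by
    exact Nat.lt_succ_of_le (pvTakeRun_length_le x rest)

def solution_alt (A : List (List Int)) : Int :=
  pvRunScan (PySem.List.sorted (A.flatMap (fun row => PySem.Set.ofList row)) (fun x => x) false)

-- ===== PRECONDITION & SPEC =====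
def Spec_solution (A : List (List Int)) (out : Int) : Prop := out = solution_alt A
instance (A : List (List Int)) (out : Int) : Decidable (Spec_solution A out) := by unfold Spec_solution; infer_instance

-- ===== CLAIM (what is proved, stated in full; the proofs are below) =====
def Claim_equal_solution : Prop := ∀ (A : List (List Int)), Dom_solution A → Spec_solution A (solution A)

-- ===== LEMMAS AND PROOFS =====

-- the list splits as the run of x's followed by the remainder
theorem pv_takeRun_split (x : Int) (l : List Int) :
    l = List.replicate (pvTakeRun x l).1 x ++ (pvTakeRun x l).2 := by
  induction l with
  | nil => simp [pvTakeRun]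
  | cons y t ih =>
    by_cases h : y = x
    · simp only [pvTakeRun, h, if_true, List.replicate_succ, List.cons_append]
      exact congrArg _ ih
    · simp [pvTakeRun, h]

-- the remainder does not start with x
theorem pv_takeRun_head (x : Int) (l : List Int) (h t' : _)
    (he : (pvTakeRun x l).2 = h :: t') : h ≠ x := by
  induction l with
  | nil => simp [pvTakeRun] at he
  | cons y t ih =>
    by_cases hy : y = x
    · simp only [pvTakeRun, hy, if_true] at he
      exact ih he
    · simp only [pvTakeRun, hy, if_false] at he
      cases he
      exact hy

-- a sorted list's run scan counts the distinct values occurring more than once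
theorem pv_runScan_sorted (n : Nat) : ∀ (S : List Int), S.length ≤ n → S.Pairwise (· ≤ ·) →
    pvRunScan S = ((S.toFinset.filter (fun v => 1 < S.count v)).card : Int) := by
  induction n with
  | zero =>
    intro S hlen _
    have : S = [] := List.eq_nil_of_length_eq_zero (Nat.le_zero.mp hlen)
    subst this
    simp [pvRunScan]
  | succ n ih =>
    intro S hlen hpw
    cases S with
    | nil => simp [pvRunScan]
    | cons x rest =>
      set c := (pvTakeRun x rest).1 with hc
      set r := (pvTakeRun x rest).2 with hr
      have hsplit : rest = List.replicate c x ++ r := pv_takeRun_split x rest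
      have hxle : ∀ v ∈ rest, x ≤ v := (List.pairwise_cons.mp hpw).1
      have hpwrest : rest.Pairwise (· ≤ ·) := (List.pairwise_cons.mp hpw).2
      have hrsub : r.Sublist rest := by
        rw [hsplit]; exact List.sublist_append_right _ _
      have hpwr : r.Pairwise (· ≤ ·) := List.Pairwise.sublist hrsub hpwrest
      have hxr : x ∉ r := by
        intro hmem
        cases hre : r with
        | nil => rw [hre] at hmem; exact (List.not_mem_nil).elim hmem
        | cons h t' =>
          have hne : h ≠ x := pv_takeRun_head x rest h t' (by rw [← hr, hre])
          rw [hre] at hmem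
          rcases List.mem_cons.mp hmem with hmem | hmem
          · exact hne hmem.symm
          · have h1 : h ≤ x := by
              rw [hre] at hpwr
              exact (List.pairwise_cons.mp hpwr).1 x hmem
            have h2 : x ≤ h := hxle h (by rw [hsplit, hre]; simp)
            exact hne (le_antisymm h1 h2)
      -- counts
      have hcx : (x :: rest).count x = c + 1 := by
        rw [List.count_cons_self, hsplit, List.count_append, List.count_replicate,
          List.count_eq_zero_of_not_mem hxr]
        simp
      have hcv : ∀ v, v ≠ x → (x :: rest).count v = r.count v := by
        intro v hv
        rw [List.count_cons_of_ne (id (Ne.symm hv)), hsplit, List.count_append, List.count_replicate]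
        simp [Ne.symm hv]
      -- finset
      have hfin : (x :: rest).toFinset = insert x r.toFinset := by
        ext v
        simp only [List.mem_toFinset, List.mem_cons, Finset.mem_insert, hsplit,
          List.mem_append, List.mem_replicate]
        constructor
        · rintro (hv | ⟨_, hv⟩ | hv)
          · exact Or.inl hv
          · exact Or.inl hv
          · exact Or.inr hv
        · rintro (hv | hv)
          · exact Or.inl hv
          · exact Or.inr (Or.inr hv)
      have hxnot : x ∉ r.toFinset := by simpa using hxr
      have hfilter :
          Finset.filter (fun v => 1 < (x :: rest).count v) r.toFinset
            = Finset.filter (fun v => 1 < r.count v) r.toFinset := by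
        apply Finset.filter_congr
        intro v hv
        have hvne : v ≠ x := by
          intro h; subst h; exact hxnot hv
        rw [hcv v hvne]
      have hrlen : r.length ≤ n := by
        have h1 : r.length ≤ rest.length := pvTakeRun_length_le x rest
        have h2 : rest.length + 1 ≤ n + 1 := by simpa using hlen
        omega
      have hIH := ih r hrlen hpwr
      rw [show pvRunScan (x :: rest)
          = (if 0 < c then 1 else 0) + pvRunScan r by rw [pvRunScan]]
      rw [hIH, hfin, Finset.filter_insert, hfilter]
      by_cases hcpos : 0 < c
      · have hpx : 1 < (x :: rest).count x := by omega
        rw [if_pos hcpos, if_pos hpx, Finset.card_insert_of_notMem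
          (fun h => hxnot (Finset.mem_of_mem_filter x h))]
        push_cast; ring
      · have hpx : ¬ 1 < (x :: rest).count x := by omega
        rw [if_neg hcpos, if_neg hpx]
        simp

-- the dict built by A's double loop counts occurrences in the flattened deduped pool
theorem pv_getD_rows (A : List (List Int)) (d : PySem.Dict Int Int) (v : Int) :
    (A.foldl (fun d row => (PySem.Set.ofList row).foldl
        (fun d k => d.insert k (d.getD k 0 + 1)) d) d).getD v 0
      = d.getD v 0 + ((A.flatMap (fun row => PySem.Set.ofList row)).count v : Int) := by
  induction A generalizing d with
  | nil => simp
  | cons row rest ih =>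
    simp only [List.foldl_cons, List.flatMap_cons, List.count_append]
    rw [ih, PySem.Dict.getD_foldl_insert_add_one]
    push_cast; ring

-- the keys stay unique through A's double loop
theorem pv_keys_nodup (A : List (List Int)) (d : PySem.Dict Int Int) (h : d.keys.Nodup) :
    (A.foldl (fun d row => (PySem.Set.ofList row).foldl
        (fun d k => d.insert k (d.getD k 0 + 1)) d) d).keys.Nodup := by
  induction A generalizing d with
  | nil => exact h
  | cons row rest ih =>
    exact ih _ (PySem.Dict.nodup_keys_foldl_insert _ _ _ h)

-- ===== VERDICT (by name: the statement is the Claim_ definition above) =====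
theorem solution_spec : Claim_equal_solution := by
  unfold Claim_equal_solution
  intro A _
  unfold Spec_solution
  simp only [solution, solution_alt]
  have hbridge := PySem.List.foldl_pyRange_zero_pyGetD A ([] : List Int)
    (fun (d : PySem.Dict Int Int) (row : List Int) =>
      List.foldl (fun (d : PySem.Dict Int Int) (doctor : Int) =>
        d.insert doctor (d.getD doctor 0 + 1)) d (PySem.Set.ofList row)) PySem.Dict.empty
  simp only [] at hbridge
  rw [hbridge]
  set L := A.flatMap (fun row => (PySem.Set.ofList row : List Int)) with hL
  set d' : PySem.Dict Int Int := List.foldl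
      (fun (d : PySem.Dict Int Int) (row : List Int) =>
        List.foldl (fun (d : PySem.Dict Int Int) (doctor : Int) =>
          d.insert doctor (d.getD doctor 0 + 1)) d (PySem.Set.ofList row))
      PySem.Dict.empty A with hd'
  have hk : d'.keys.Nodup := pv_keys_nodup A PySem.Dict.empty PySem.Dict.nodup_keys_empty
  have hget : ∀ v, d'.getD v 0 = (L.count v : Int) := by
    intro v
    rw [hd', pv_getD_rows]
    rw [PySem.Dict.getD_empty, ← hL]
    ring
  -- A's value-counting pass
  rw [PySem.List.foldl_ite_add_one (p := fun v : Int => v > 1), PySem.Dict.values_eq_map_keys d' hk 0,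
    List.countP_map]
  have hcong : d'.keys.countP ((fun x => decide (x > 1)) ∘ fun k => d'.getD k 0)
      = d'.keys.countP (fun k => decide (1 < L.count k)) := by
    apply List.countP_congr
    intro k _
    simp only [Function.comp_apply, hget k, gt_iff_lt]
    exact_mod_cast Iff.rfl
  rw [hcong]
  -- both sides equal the card of the same finset
  have hmemkeys : ∀ v, 1 < L.count v → v ∈ d'.keys := by
    intro v hv
    by_contra hnk
    have hc : d'.contains v = false := by
      rw [Bool.eq_false_iff]
      intro hcon
      exact hnk ((PySem.Dict.contains_iff_mem_keys d' v).1 hcon)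
    have := hget v
    rw [PySem.Dict.getD_of_not_contains d' 0 hc] at this
    omega
  have hAcard : d'.keys.countP (fun k => decide (1 < L.count k))
      = (L.toFinset.filter (fun v => 1 < L.count v)).card := by
    rw [List.countP_eq_length_filter]
    have hnd : (d'.keys.filter (fun k => decide (1 < L.count k))).Nodup := hk.filter _
    rw [← List.toFinset_card_of_nodup hnd]
    congr 1
    ext v
    simp only [List.mem_toFinset, List.mem_filter, Finset.mem_filter, decide_eq_true_iff]
    constructor
    · rintro ⟨_, hv⟩
      exact ⟨List.count_pos_iff.mp (by omega), hv⟩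
    · rintro ⟨_, hv⟩
      exact ⟨hmemkeys v hv, hv⟩
  rw [hAcard]
  -- B's side
  set S := PySem.List.sorted L (fun x => x) false with hS
  have hperm : S.Perm L := PySem.List.sorted_perm L (fun x => x) false
  have hpw : S.Pairwise (· ≤ ·) := PySem.List.sorted_pairwise L (fun x => x)
  rw [pv_runScan_sorted S.length S le_rfl hpw]
  have hfs : S.toFinset.filter (fun v => 1 < S.count v)
      = L.toFinset.filter (fun v => 1 < L.count v) := by
    rw [List.toFinset_eq_of_perm S L hperm]
    apply Finset.filter_congr
    intro v _
    rw [hperm.count_eq]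
  rw [hfs]
  ring
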